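-- pv_equiv track=rewrite | github.com/chandankmishra/lang | python/review/epi_4_5_6_7multiply_power.py | helper
-- ===== SOURCE A (Python) =====
-- def helper(x, y):
--     if y == 1:
--         return x
--     half = helper(x, y >> 1)
--     if y & 1:
--         return half + half + x
--     else:
--         return half + half
-- ===== SOURCE B (Python) =====
-- def helper(x, y):
--     bits = []
--     while y > 1:
--         bits.append(y & 1)
--         y >>= 1
--     acc = x
--     for b in reversed(bits):
--         acc = acc + acc + (x if b else 0)
--     return acc
-- ===== Notes on version B (the rewrite author's own statement) =====
-- stated objective: alternative
-- what changed: Replaced the doubling recursion by an explicit iterative shift-and-add: a while loop collects y's low bits, then a loop doubles an accumulator from the most-significant bit down, adding x when a bit is set.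
import Mathlib
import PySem

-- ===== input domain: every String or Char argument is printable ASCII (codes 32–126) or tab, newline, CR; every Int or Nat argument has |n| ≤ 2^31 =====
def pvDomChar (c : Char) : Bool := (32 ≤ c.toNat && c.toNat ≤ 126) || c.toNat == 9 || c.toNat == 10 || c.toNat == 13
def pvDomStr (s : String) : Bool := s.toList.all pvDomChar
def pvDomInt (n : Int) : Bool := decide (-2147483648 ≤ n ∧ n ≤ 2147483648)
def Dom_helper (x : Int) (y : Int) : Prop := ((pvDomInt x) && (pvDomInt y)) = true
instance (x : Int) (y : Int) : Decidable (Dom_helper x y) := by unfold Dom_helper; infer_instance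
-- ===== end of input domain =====

-- B replaces A's doubling recursion by an iterative shift-and-add over y's bits (alternative decomposition, same cost).

-- ===== PORT A =====
-- Literal port of A's recursion; the 'y ≤ 0' guard only makes the recursion total —
-- Python A raises RecursionError there (excluded by Pre_helper below).
def helper (x : Int) (y : Int) : Int :=
  if y ≤ 0 then 0
  else if y = 1 then x
  else
    let half := helper x (PySem.Int.floordiv y 2)
    if PySem.Int.mod y 2 = 1 then half + half + x else half + half
termination_by y.toNat
decreasing_by
  rename_i h1 _
  rw [PySem.Int.floordiv_eq_ediv_of_pos (by omega)]
  omega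

-- ===== PORT B =====
-- the while loop: while y > 1: bits.append(y & 1); y >>= 1
def pvBits (y : Int) (bits : List Int) : List Int :=
  if y > 1 then pvBits (PySem.Int.floordiv y 2) (bits ++ [PySem.Int.mod y 2]) else bits
termination_by y.toNat
decreasing_by
  rename_i h1
  rw [PySem.Int.floordiv_eq_ediv_of_pos (by omega)]
  omega

def helper_alt (x : Int) (y : Int) : Int :=
  (pvBits y []).reverse.foldl (fun acc b => acc + acc + (if b ≠ 0 then x else 0)) x

-- ===== PRECONDITION & SPEC =====
-- Pre_ excludes y ≤ 0, where Python A recurses forever and raises RecursionError.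
def Pre_helper (x : Int) (y : Int) : Prop := 1 ≤ y
instance (x : Int) (y : Int) : Decidable (Pre_helper x y) := by unfold Pre_helper; infer_instance
def pvWitness_helper : Int × Int := (3, 5)

def Spec_helper (x : Int) (y : Int) (out : Int) : Prop := out = helper_alt x y
instance (x : Int) (y : Int) (out : Int) : Decidable (Spec_helper x y out) := by unfold Spec_helper; infer_instance

-- ===== CLAIM (what is proved, stated in full; the proofs are below) =====
def Claim_equal_helper : Prop := ∀ (x : Int) (y : Int), Dom_helper x y → Pre_helper x y → Spec_helper x y (helper x y)

-- ===== LEMMAS AND PROOFS =====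

-- the accumulator of the bits loop is pure accumulation
theorem pvBits_acc (y : Int) (bits : List Int) : pvBits y bits = bits ++ pvBits y [] := by
  induction hn : y.toNat using Nat.strong_induction_on generalizing y bits with
  | _ n ih =>
    rw [pvBits]
    conv_rhs => rw [pvBits]
    by_cases h : y > 1
    · have hfd : PySem.Int.floordiv y 2 = y / 2 := PySem.Int.floordiv_eq_ediv_of_pos (by omega)
      have hlt : (PySem.Int.floordiv y 2).toNat < n := by rw [hfd]; omega
      rw [if_pos h, if_pos h, ih _ hlt _ _ rfl, ih _ hlt _ ([] ++ [PySem.Int.mod y 2]) rfl]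
      simp
    · rw [if_neg h, if_neg h]
      simp

theorem helper_eq_alt (x y : Int) (hy : 1 ≤ y) : helper x y = helper_alt x y := by
  unfold helper_alt
  induction hn : y.toNat using Nat.strong_induction_on generalizing y with
  | _ n ih =>
    rw [helper]
    by_cases h1 : y = 1
    · subst h1
      rw [pvBits]
      simp
    · have h2 : 1 < y := by omega
      have hfd : PySem.Int.floordiv y 2 = y / 2 := PySem.Int.floordiv_eq_ediv_of_pos (by omega)
      have hmod : PySem.Int.mod y 2 = y % 2 := PySem.Int.mod_eq_emod_of_pos (by omega)
      have hlt : (PySem.Int.floordiv y 2).toNat < n := by rw [hfd]; omega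
      have hge : 1 ≤ PySem.Int.floordiv y 2 := by rw [hfd]; omega
      rw [if_neg (by omega), if_neg h1, pvBits, if_pos (by omega : y > 1), pvBits_acc]
      simp only [List.nil_append, List.reverse_append, List.reverse_cons, List.reverse_nil,
        List.foldl_append, List.foldl_cons, List.foldl_nil]
      rw [← ih _ hlt _ hge rfl]
      have hm : y % 2 = 0 ∨ y % 2 = 1 := by omega
      rw [hmod]
      rcases hm with hm | hm <;> simp [hm]

-- ===== VERDICT (by name: the statement is the Claim_ definition above) =====
theorem helper_spec : Claim_equal_helper := by
  intro x y _ hy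
  exact helper_eq_alt x y hy
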